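-- pv_equiv track=rewrite | github.com/ElliottStarosta/Data-Summative | high.py | find_best_direction_value_only
-- ===== SOURCE A (Python) =====
-- def find_best_direction_value_only(card_value, remaining_deck):
--     """Find best H/L/T guess (value only) based on remaining cards."""
--     higher_count = sum(1 for c in remaining_deck if c['value'] > card_value)
--     lower_count = sum(1 for c in remaining_deck if c['value'] < card_value)
--     tie_count = sum(1 for c in remaining_deck if c['value'] == card_value)
--
--     if higher_count >= lower_count and higher_count >= tie_count:
--         return 'Higher'
--     elif lower_count >= tie_count:
--         return 'Lower'
--     else:
--         return 'Tie'
-- ===== SOURCE B (Python) =====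
-- def find_best_direction_value_only(card_value, remaining_deck):
--     """Find best H/L/T guess (value only) based on remaining cards."""
--     counts = {}
--     for c in remaining_deck:
--         v = c['value']
--         counts[v] = counts.get(v, 0) + 1
--     higher = lower = tie = 0
--     for v, n in counts.items():
--         if v > card_value:
--             higher += n
--         elif v < card_value:
--             lower += n
--         else:
--             tie += n
--     if higher >= lower and higher >= tie:
--         return 'Higher'
--     if lower >= tie:
--         return 'Lower'
--     return 'Tie'
-- ===== Notes on version B (the rewrite author's own statement) =====
-- stated objective: alternative
-- what changed: B first builds a frequency table of the deck's values (one indexing pass), then derives the three counts by iterating over the DISTINCT values weighted by their multiplicities, instead of A's three full rescans of the whole deck.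
import Mathlib
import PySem

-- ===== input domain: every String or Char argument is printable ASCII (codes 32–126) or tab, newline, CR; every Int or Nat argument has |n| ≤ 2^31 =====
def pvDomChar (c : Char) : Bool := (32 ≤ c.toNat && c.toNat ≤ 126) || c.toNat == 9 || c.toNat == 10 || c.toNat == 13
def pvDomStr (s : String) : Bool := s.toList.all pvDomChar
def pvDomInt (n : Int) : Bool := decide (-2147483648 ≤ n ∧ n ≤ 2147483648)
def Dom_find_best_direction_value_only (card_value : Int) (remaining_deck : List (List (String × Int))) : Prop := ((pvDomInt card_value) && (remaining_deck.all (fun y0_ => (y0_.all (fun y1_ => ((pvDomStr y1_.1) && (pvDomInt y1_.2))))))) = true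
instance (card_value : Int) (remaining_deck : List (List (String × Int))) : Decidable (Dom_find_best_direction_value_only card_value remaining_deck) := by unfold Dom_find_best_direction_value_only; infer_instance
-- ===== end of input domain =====

-- B builds a frequency table of the deck's values once, then derives the three counts from the
-- distinct values weighted by multiplicity, instead of A's three full rescans; return value only.

-- c['value'] : exact under Pre_ (the key is present; Python raises KeyError otherwise, excluded by Pre_)
def pvValue (c : List (String × Int)) : Int := (PySem.Dict.mk c).getD "value" 0

-- ===== PORT A =====
def find_best_direction_value_only (card_value : Int) (remaining_deck : List (List (String × Int))) : String :=
  let higher_count : Int := remaining_deck.foldl (fun acc c => if pvValue c > card_value then acc + 1 else acc) 0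
  let lower_count : Int := remaining_deck.foldl (fun acc c => if pvValue c < card_value then acc + 1 else acc) 0
  let tie_count : Int := remaining_deck.foldl (fun acc c => if pvValue c = card_value then acc + 1 else acc) 0
  if higher_count ≥ lower_count ∧ higher_count ≥ tie_count then "Higher"
  else if lower_count ≥ tie_count then "Lower"
  else "Tie"

-- ===== PORT B =====
def find_best_direction_value_only_alt (card_value : Int) (remaining_deck : List (List (String × Int))) : String :=
  let counts : PySem.Dict Int Int :=
    remaining_deck.foldl (fun d c => let v := pvValue c; d.insert v (d.getD v 0 + 1)) PySem.Dict.empty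
  let s : Int × Int × Int := counts.items.foldl
    (fun (s : Int × Int × Int) (p : Int × Int) =>
      if p.1 > card_value then (s.1 + p.2, s.2.1, s.2.2)
      else if p.1 < card_value then (s.1, s.2.1 + p.2, s.2.2)
      else (s.1, s.2.1, s.2.2 + p.2)) (0, 0, 0)
  if s.1 ≥ s.2.1 ∧ s.1 ≥ s.2.2 then "Higher"
  else if s.2.1 ≥ s.2.2 then "Lower"
  else "Tie"

-- ===== PRECONDITION & SPEC =====
-- Pre_: every card has the key 'value'; on a card without it Python A raises KeyError.
def Pre_find_best_direction_value_only (card_value : Int) (remaining_deck : List (List (String × Int))) : Prop :=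
  ∀ c ∈ remaining_deck, (PySem.Dict.mk c).contains "value" = true
instance (card_value : Int) (remaining_deck : List (List (String × Int))) : Decidable (Pre_find_best_direction_value_only card_value remaining_deck) := by unfold Pre_find_best_direction_value_only; infer_instance
def pvWitness_find_best_direction_value_only : Int × (List (List (String × Int))) := (5, [[("value", 7)], [("value", 3)]])

def Spec_find_best_direction_value_only (card_value : Int) (remaining_deck : List (List (String × Int))) (out : String) : Prop := out = find_best_direction_value_only_alt card_value remaining_deck
instance (card_value : Int) (remaining_deck : List (List (String × Int))) (out : String) : Decidable (Spec_find_best_direction_value_only card_value remaining_deck out) := by unfold Spec_find_best_direction_value_only; infer_instance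

-- ===== CLAIM (what is proved, stated in full; the proofs are below) =====
def Claim_equal_find_best_direction_value_only : Prop := ∀ (card_value : Int) (remaining_deck : List (List (String × Int))), Dom_find_best_direction_value_only card_value remaining_deck → Pre_find_best_direction_value_only card_value remaining_deck → Spec_find_best_direction_value_only card_value remaining_deck (find_best_direction_value_only card_value remaining_deck)

-- ===== LEMMAS AND PROOFS =====

-- A's generator-sum: a count-up foldl is the countP plus the accumulator.
theorem pv_foldA_count (p : List (String × Int) → Prop) [DecidablePred p]
    (l : List (List (String × Int))) (a : Int) :
    l.foldl (fun acc c => if p c then acc + 1 else acc) a = a + (l.countP (fun c => decide (p c)) : Int) := by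
  induction l generalizing a with
  | nil => simp
  | cons x xs ih =>
    simp only [List.foldl_cons, List.countP_cons, ih]
    by_cases h : p x <;> simp [h] <;> omega

-- B's second loop splits into three weighted sums over the items list.
theorem pv_fold_items (cv : Int) (l : List (Int × Int)) (a b t : Int) :
    l.foldl (fun (s : Int × Int × Int) (p : Int × Int) =>
      if p.1 > cv then (s.1 + p.2, s.2.1, s.2.2)
      else if p.1 < cv then (s.1, s.2.1 + p.2, s.2.2)
      else (s.1, s.2.1, s.2.2 + p.2)) (a, b, t)
    = (a + (l.map (fun p => if p.1 > cv then p.2 else 0)).sum,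
       b + (l.map (fun p => if p.1 < cv then p.2 else 0)).sum,
       t + (l.map (fun p => if ¬ p.1 > cv ∧ ¬ p.1 < cv then p.2 else 0)).sum) := by
  induction l generalizing a b t with
  | nil => simp
  | cons x xs ih =>
    simp only [List.foldl_cons, List.map_cons, List.sum_cons, ih]
    rcases lt_trichotomy x.1 cv with h | h | h
    · have h1 : ¬ x.1 > cv := by omega
      simp [h1, h]
      omega
    · have h1 : ¬ x.1 > cv := by omega
      have h2 : ¬ x.1 < cv := by omega
      simp [h1, h2]
      omega
    · simp [h, not_lt.mpr (le_of_lt h)]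
      omega
-- countP splits across a filter and its complement.
theorem pv_countP_split (p q : Int → Bool) (xs : List Int) :
    xs.countP p = (xs.filter q).countP p + (xs.filter (fun a => !q a)).countP p := by
  induction xs with
  | nil => simp
  | cons x xs ih =>
    by_cases hq : q x <;> by_cases hp : p x <;>
      simp [hq, hp, ih] <;> omega

-- Summing (if p k then count k else 0) over any Nodup cover of xs gives countP p xs.
theorem pv_sum_counts (p : Int → Prop) [DecidablePred p] :
    ∀ (ks xs : List Int), ks.Nodup → (∀ x ∈ xs, x ∈ ks) →
    (ks.map (fun k => if p k then (xs.count k : Int) else 0)).sum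
      = (xs.countP (fun x => decide (p x)) : Int) := by
  intro ks
  induction ks with
  | nil =>
    intro xs _ hcov
    have : xs = [] := List.eq_nil_iff_forall_not_mem.mpr (fun x hx => by simpa using hcov x hx)
    simp [this]
  | cons k ks ih =>
    intro xs hnd hcov
    have hk : k ∉ ks := (List.nodup_cons.mp hnd).1
    have hnd' : ks.Nodup := (List.nodup_cons.mp hnd).2
    have hsplit := pv_countP_split (fun x => decide (p x)) (fun a => a == k) xs
    have hcount : ∀ k' ∈ ks, xs.count k' = (xs.filter (fun a => !(a == k))).count k' := by
      intro k' hk'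
      have hne : k' ≠ k := fun h => hk (h ▸ hk')
      rw [List.count_filter]
      simp [hne]
    have hcov' : ∀ x ∈ xs.filter (fun a => !(a == k)), x ∈ ks := by
      intro x hx
      rcases List.mem_filter.mp hx with ⟨hxm, hxne⟩
      have : x ≠ k := by simpa using hxne
      rcases List.mem_cons.mp (hcov x hxm) with h | h
      · exact absurd h this
      · exact h
    have htail := ih (xs.filter (fun a => !(a == k))) hnd' hcov'
    have hmap : (ks.map (fun k' => if p k' then (xs.count k' : Int) else 0)).sum
        = (ks.map (fun k' => if p k' then ((xs.filter (fun a => !(a == k))).count k' : Int) else 0)).sum := by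
      apply congrArg
      apply List.map_congr_left
      intro k' hk'
      rw [hcount k' hk']
    have hhead : ((xs.filter (fun a => a == k)).countP (fun x => decide (p x)) : Int)
        = if p k then (xs.count k : Int) else 0 := by
      have : xs.filter (fun a => a == k) = List.replicate (xs.count k) k := List.filter_beq (l := xs) (a := k)
      rw [this]
      by_cases hp : p k <;> simp [List.countP_replicate, hp, List.count]
    rw [List.map_cons, List.sum_cons, hmap, htail, ← hhead]
    have := hsplit
    push_cast [this]
    ring

-- ===== VERDICT (by name: the statement is the Claim_ definition above) =====
theorem find_best_direction_value_only_spec : Claim_equal_find_best_direction_value_only := by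
  intro cv deck _ _
  unfold Spec_find_best_direction_value_only find_best_direction_value_only find_best_direction_value_only_alt
  dsimp only
  have hctr : deck.foldl (fun d c => let v := pvValue c; d.insert v (d.getD v 0 + 1)) PySem.Dict.empty
      = PySem.Dict.counter (deck.map pvValue) := by
    rw [← PySem.Dict.foldl_insert_getD_add_one_eq_counter, List.foldl_map]
  rw [hctr, PySem.Dict.items_counter, pv_foldA_count (fun c => pvValue c > cv),
      pv_foldA_count (fun c => pvValue c < cv), pv_foldA_count (fun c => pvValue c = cv)]
  set vs := deck.map pvValue with hvs
  rw [pv_fold_items, List.map_map, List.map_map, List.map_map]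
  have hnd := PySem.Set.nodup_ofList (xs := vs)
  have hcov : ∀ x ∈ vs, x ∈ PySem.Set.ofList vs := fun x hx => (PySem.Set.mem_ofList vs x).mpr hx
  have e1 := pv_sum_counts (fun k => k > cv) (PySem.Set.ofList vs) vs hnd hcov
  have e2 := pv_sum_counts (fun k => k < cv) (PySem.Set.ofList vs) vs hnd hcov
  have e3 := pv_sum_counts (fun k => ¬ k > cv ∧ ¬ k < cv) (PySem.Set.ofList vs) vs hnd hcov
  rw [show ((fun (p : Int × Int) => if p.1 > cv then p.2 else 0) ∘ fun k => (k, (vs.count k : Int)))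
        = fun k => if k > cv then (vs.count k : Int) else 0 from rfl,
      show ((fun (p : Int × Int) => if p.1 < cv then p.2 else 0) ∘ fun k => (k, (vs.count k : Int)))
        = fun k => if k < cv then (vs.count k : Int) else 0 from rfl,
      show ((fun (p : Int × Int) => if ¬ p.1 > cv ∧ ¬ p.1 < cv then p.2 else 0) ∘ fun k => (k, (vs.count k : Int)))
        = fun k => if ¬ k > cv ∧ ¬ k < cv then (vs.count k : Int) else 0 from rfl,
      e1, e2, e3]
  have hc1 : vs.countP (fun x => decide (x > cv)) = deck.countP (fun c => decide (pvValue c > cv)) := by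
    rw [hvs, List.countP_map]; rfl
  have hc2 : vs.countP (fun x => decide (x < cv)) = deck.countP (fun c => decide (pvValue c < cv)) := by
    rw [hvs, List.countP_map]; rfl
  have hc3 : vs.countP (fun x => decide (¬ x > cv ∧ ¬ x < cv)) = deck.countP (fun c => decide (pvValue c = cv)) := by
    rw [hvs, List.countP_map]
    apply List.countP_congr
    intro c _
    constructor <;> intro h <;> simp_all <;> omega
  rw [hc1, hc2, hc3]
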